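-- pv_equiv track=rewrite | github.com/ljbrown4/university-projects | TTS.py | max_change_day
-- ===== SOURCE A (Python) =====
-- def max_change_day(prices):
--     '''returns the day of the greatest price change
--         input: prices is a list of 2 or more numbers'''
--     maxchange = 0
--     day = 0
--     for i in range(len(prices)-1):
--         change = (prices[i+1]-prices[i])
--         if change > maxchange:
--             maxchange = change
--             day = i + 1
--     return day
-- ===== SOURCE B (Python) =====
-- def max_change_day(prices):
--     '''returns the day of the greatest price change
--         input: prices is a list of 2 or more numbers'''
--     changes = [b - a for a, b in zip(prices, prices[1:])]
--     best = max(changes, default=0)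
--     if best > 0:
--         return changes.index(best) + 1
--     return 0
-- ===== Notes on version B (the rewrite author's own statement) =====
-- stated objective: idiomatic
-- what changed: Replaces the fused running-max index loop with a build-then-reduce-then-locate decomposition: materialize the list of consecutive differences, take max(..., default=0), and use .index to find the first day of the best positive change.
import Mathlib
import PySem

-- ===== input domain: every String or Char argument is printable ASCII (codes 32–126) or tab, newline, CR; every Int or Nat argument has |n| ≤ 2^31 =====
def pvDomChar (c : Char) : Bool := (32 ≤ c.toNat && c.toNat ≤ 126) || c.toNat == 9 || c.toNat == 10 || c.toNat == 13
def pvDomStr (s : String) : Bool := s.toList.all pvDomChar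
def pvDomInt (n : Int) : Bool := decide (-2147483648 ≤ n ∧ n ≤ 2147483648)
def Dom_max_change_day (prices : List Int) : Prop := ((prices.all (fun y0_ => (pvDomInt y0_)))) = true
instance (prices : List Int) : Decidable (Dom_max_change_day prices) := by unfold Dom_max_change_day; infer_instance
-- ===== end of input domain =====

-- B replaces A's fused running-max loop by a build-then-reduce-then-locate decomposition
-- (materialize the consecutive differences, take the max with default 0, find its first index); idiomatic, same cost.


-- ===== PORT A =====
-- literal port of A: one pass over range(len(prices)-1) tracking (maxchange, day)
def max_change_day (prices : List Int) : Int :=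
  ((PySem.List.pyRange 0 (PySem.List.len prices - 1) 1).foldl
    (fun (s : Int × Int) i =>
      let change := PySem.List.pyGetD prices (i + 1) 0 - PySem.List.pyGetD prices i 0
      if change > s.1 then (change, i + 1) else s)
    (0, 0)).2

-- ===== PORT B =====
-- B's changes = [b - a for a, b in zip(prices, prices[1:])]
def pvChanges (prices : List Int) : List Int :=
  (prices.zip (prices.drop 1)).map (fun p => p.2 - p.1)

-- literal port of B: best = max(changes, default=0); first index of best if best > 0, else 0
def max_change_day_alt (prices : List Int) : Int :=
  let changes := pvChanges prices
  let best := PySem.List.maxD changes (fun y => y) 0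
  if best > 0 then
    match PySem.List.index? changes best with
    | some i => (i : Int) + 1
    | none => 0   -- unreachable: best > 0 implies best ∈ changes
  else 0

-- ===== PRECONDITION & SPEC =====
def Spec_max_change_day (prices : List Int) (out : Int) : Prop := out = max_change_day_alt prices
instance (prices : List Int) (out : Int) : Decidable (Spec_max_change_day prices out) := by unfold Spec_max_change_day; infer_instance

-- ===== CLAIM (what is proved, stated in full; the proofs are below) =====
def Claim_equal_max_change_day : Prop := ∀ (prices : List Int), Dom_max_change_day prices → Spec_max_change_day prices (max_change_day prices)

-- ===== LEMMAS AND PROOFS =====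

-- A's loop restated structurally over the differences list, carrying the running day index j
def pvLoop : List Int → Int × Int → Int → Int × Int
  | [], s, _ => s
  | c :: cs, s, j => pvLoop cs (if c > s.1 then (c, j + 1) else s) (j + 1)

theorem pvChanges_length (ps : List Int) : (pvChanges ps).length = ps.length - 1 := by
  simp [pvChanges]

theorem pvChanges_getElem (ps : List Int) (k : Nat) (hk : k < (pvChanges ps).length) :
    (pvChanges ps)[k] = ps[k + 1]'(by have := pvChanges_length ps; omega) - ps[k]'(by have := pvChanges_length ps; omega) := by
  have hk' : k < (ps.zip (ps.drop 1)).length := by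
    simpa [pvChanges] using hk
  simp only [pvChanges, List.getElem_map, List.getElem_zip, List.getElem_drop]
  have h1k : 1 + k = k + 1 := Nat.add_comm 1 k
  simp [h1k]

theorem foldl_max_split (l : List Int) (a b : Int) :
    l.foldl max (max a b) = max a (l.foldl max b) := by
  induction l generalizing a b with
  | nil => rfl
  | cons c l ih => simp only [List.foldl_cons, max_assoc, ih]

-- A's pyRange fold, started at index k, is pvLoop over the dropped suffix of the differences
theorem pvBridge (ps : List Int) (k : Nat) (s : Int × Int) :
    (PySem.List.pyRange (k : Int) (PySem.List.len ps - 1) 1).foldl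
      (fun (s : Int × Int) i =>
        let change := PySem.List.pyGetD ps (i + 1) 0 - PySem.List.pyGetD ps i 0
        if change > s.1 then (change, i + 1) else s)
      s = pvLoop ((pvChanges ps).drop k) s k := by
  by_cases h : k < (pvChanges ps).length
  · have hlen : (k : Int) < PySem.List.len ps - 1 := by
      have := pvChanges_length ps
      simp only [PySem.List.len_eq]
      omega
    have hk1 : k + 1 < ps.length := by have := pvChanges_length ps; omega
    have hk0 : k < ps.length := by omega
    have hget1 : PySem.List.pyGetD ps ((k : Int) + 1) 0 = ps[k + 1] := by
      have hc : ((k : Int) + 1) = ((k + 1 : Nat) : Int) := by push_cast; ring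
      rw [hc, PySem.List.pyGetD_natCast]
      exact List.getD_eq_getElem _ _ hk1
    have hget0 : PySem.List.pyGetD ps (k : Int) 0 = ps[k] := by
      rw [PySem.List.pyGetD_natCast]
      exact List.getD_eq_getElem _ _ hk0
    have hdrop : (pvChanges ps).drop k = (pvChanges ps)[k] :: (pvChanges ps).drop (k + 1) :=
      (List.drop_eq_getElem_cons h)
    rw [PySem.List.pyRange_one_cons hlen, hdrop]
    simp only [List.foldl_cons, pvLoop, pvChanges_getElem ps k h, hget1, hget0]
    have hrec := pvBridge ps (k + 1)
      (if ps[k + 1] - ps[k] > s.1 then (ps[k + 1] - ps[k], (k : Int) + 1) else s)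
    have hcast : ((k : Int) + 1) = ((k + 1 : Nat) : Int) := by push_cast; ring
    rw [← hcast] at hrec
    exact hrec
  · have h1 : (pvChanges ps).drop k = [] := List.drop_eq_nil_of_le (by omega)
    have h2 : PySem.List.pyRange (k : Int) (PySem.List.len ps - 1) 1 = [] := by
      apply PySem.List.pyRange_one_eq_nil
      have := pvChanges_length ps
      simp only [PySem.List.len_eq]
      omega
    rw [h1, h2, pvLoop]
    rfl
termination_by (pvChanges ps).length - k
decreasing_by have := pvChanges_length ps; omega

-- the fused loop computes (running max, day of its first occurrence)
theorem pvLoop_spec (cs : List Int) (m d j : Int) :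
    pvLoop cs (m, d) j =
      if cs.foldl max m > m then
        (cs.foldl max m, j + (((PySem.List.index? cs (cs.foldl max m)).getD 0 : Nat) : Int) + 1)
      else (m, d) := by
  induction cs generalizing m d j with
  | nil => simp [pvLoop]
  | cons c cs ih =>
    have hmem : ∀ {a : Int}, cs.foldl max a > a → cs.foldl max a ∈ cs := by
      intro a ha
      rcases PySem.List.foldl_max_mem cs a with h | h
      · omega
      · exact h
    rw [pvLoop]
    by_cases hc : c > m
    · simp only [if_pos hc, ih]
      have hmc : max m c = c := by omega
      by_cases h2 : cs.foldl max c > c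
      · have hM : (c :: cs).foldl max m > m := by simp [hmc]; omega
        have hMe : (c :: cs).foldl max m = cs.foldl max c := by simp [hmc]
        rw [if_pos h2, if_pos hM, hMe]
        have hne : c ≠ cs.foldl max c := by omega
        rw [PySem.List.index?_cons_of_ne cs hne]
        obtain ⟨i, hi⟩ := Option.isSome_iff_exists.mp
          ((PySem.List.index?_isSome_iff cs _).mpr (hmem h2))
        rw [hi]
        simp only [Option.map_some, Option.getD_some]
        push_cast
        ring_nf
      · have hfc : cs.foldl max c = c := by
          have := (PySem.List.le_foldl_max cs c).1
          omega
        have hM : (c :: cs).foldl max m > m := by simp [hmc, hfc]; omega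
        have hMe : (c :: cs).foldl max m = c := by simp [hmc, hfc]
        rw [if_neg h2, if_pos hM, hMe, PySem.List.index?_cons_self]
        simp
    · simp only [if_neg hc, ih]
      have hmc : max m c = m := by omega
      by_cases h2 : cs.foldl max m > m
      · have hM : (c :: cs).foldl max m > m := by simp [hmc]; omega
        have hMe : (c :: cs).foldl max m = cs.foldl max m := by simp [hmc]
        rw [if_pos h2, if_pos hM, hMe]
        have hne : c ≠ cs.foldl max m := by omega
        rw [PySem.List.index?_cons_of_ne cs hne]
        obtain ⟨i, hi⟩ := Option.isSome_iff_exists.mp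
          ((PySem.List.index?_isSome_iff cs _).mpr (hmem h2))
        rw [hi]
        simp only [Option.map_some, Option.getD_some]
        push_cast
        ring_nf
      · have hM : ¬ (c :: cs).foldl max m > m := by simp [hmc]; omega
        rw [if_neg h2, if_neg hM]

-- ===== VERDICT (by name: the statement is the Claim_ definition above) =====
theorem max_change_day_spec : Claim_equal_max_change_day := by
  intro ps _
  unfold Spec_max_change_day max_change_day max_change_day_alt
  have hb := pvBridge ps 0 (0, 0)
  simp only [Nat.cast_zero, List.drop_zero] at hb
  rw [hb, pvLoop_spec]
  cases hcs : pvChanges ps with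
  | nil => rfl
  | cons c cs =>
    have hmaxD : PySem.List.maxD (c :: cs) (fun y => y) 0 = cs.foldl max c := by
      simp [PySem.List.maxD, PySem.List.max?_id_cons]
    have hsplit : (c :: cs).foldl max 0 = max 0 (cs.foldl max c) := by
      simp only [List.foldl_cons]
      exact foldl_max_split cs 0 c
    simp only [hmaxD, hsplit]
    by_cases hbest : cs.foldl max c > 0
    · have h0 : max (0 : Int) (cs.foldl max c) > 0 := by omega
      have h0' : max (0 : Int) (cs.foldl max c) = cs.foldl max c := by omega
      rw [if_pos h0, if_pos hbest, h0']
      have hmem2 : cs.foldl max c ∈ c :: cs := by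
        rcases PySem.List.foldl_max_mem cs c with h | h
        · rw [h]; exact List.mem_cons_self
        · exact List.mem_cons_of_mem c h
      obtain ⟨i, hi⟩ := Option.isSome_iff_exists.mp
        ((PySem.List.index?_isSome_iff (c :: cs) (cs.foldl max c)).mpr hmem2)
      rw [hi]
      simp
    · have h0 : ¬ max (0 : Int) (cs.foldl max c) > 0 := by omega
      rw [if_neg h0, if_neg hbest]
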